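-- pv_equiv track=rewrite | github.com/hjjing123/CodeScope | backend/app/services/scan_external/neo4j_runner.py | strip_cypher_comments
-- ===== SOURCE A (Python) =====
-- def strip_cypher_comments(text: str) -> str:
--     out: list[str] = []
--     i = 0
--     in_single = False
--     in_double = False
--     in_backtick = False
--     in_line_comment = False
--     in_block_comment = False
--
--     while i < len(text):
--         ch = text[i]
--         nxt = text[i + 1] if i + 1 < len(text) else ""
--
--         if in_line_comment:
--             if ch == "\n":
--                 in_line_comment = False
--                 out.append(ch)
--             i += 1
--             continue
--
--         if in_block_comment:
--             if ch == "*" and nxt == "/":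
--                 in_block_comment = False
--                 i += 2
--             else:
--                 i += 1
--             continue
--
--         if not in_single and not in_double and not in_backtick:
--             if ch == "/" and nxt == "/":
--                 in_line_comment = True
--                 i += 2
--                 continue
--             if ch == "/" and nxt == "*":
--                 in_block_comment = True
--                 i += 2
--                 continue
--
--         if ch == "'" and not in_double and not in_backtick:
--             if in_single and nxt == "'":
--                 out.append("''")
--                 i += 2
--                 continue
--             in_single = not in_single
--             out.append(ch)
--             i += 1
--             continue
--
--         if ch == '"' and not in_single and not in_backtick:
--             in_double = not in_double
--             out.append(ch)
--             i += 1
--             continue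
--
--         if ch == "`" and not in_single and not in_double:
--             in_backtick = not in_backtick
--             out.append(ch)
--             i += 1
--             continue
--
--         out.append(ch)
--         i += 1
--
--     return "".join(out)
-- ===== SOURCE B (Python) =====
-- def strip_cypher_comments(text: str) -> str:
--     # Span-based scanner: instead of a char-by-char state machine with five
--     # boolean flags, consume whole tokens (comments, quoted literals) at once.
--     out: list[str] = []
--     i, n = 0, len(text)
--     while i < n:
--         ch = text[i]
--         if ch == "/" and text.startswith("//", i):
--             j = text.find("\n", i + 2)
--             i = n if j < 0 else j          # newline itself is kept (next round)
--         elif ch == "/" and text.startswith("/*", i):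
--             j = text.find("*/", i + 2)
--             i = n if j < 0 else j + 2
--         elif ch == "'":
--             j = i + 1
--             while j < n:
--                 if text[j] == "'":
--                     if j + 1 < n and text[j + 1] == "'":
--                         j += 2              # '' escape stays inside the literal
--                     else:
--                         j += 1
--                         break
--                 else:
--                     j += 1
--             out.append(text[i:j])
--             i = j
--         elif ch == '"' or ch == '`':
--             j = text.find(ch, i + 1)
--             j = n if j < 0 else j + 1
--             out.append(text[i:j])
--             i = j
--         else:
--             out.append(ch)
--             i += 1
--     return "".join(out)
-- ===== Notes on version B (the rewrite author's own statement) =====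
-- stated objective: faster
-- what changed: Replaced A's char-by-char state machine with five boolean mode flags by a span scanner that, at each top-level position, consumes a whole token (line comment to its newline via str.find, block comment past */, quoted/backtick literal to its closing delimiter) in one step.
import Mathlib
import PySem

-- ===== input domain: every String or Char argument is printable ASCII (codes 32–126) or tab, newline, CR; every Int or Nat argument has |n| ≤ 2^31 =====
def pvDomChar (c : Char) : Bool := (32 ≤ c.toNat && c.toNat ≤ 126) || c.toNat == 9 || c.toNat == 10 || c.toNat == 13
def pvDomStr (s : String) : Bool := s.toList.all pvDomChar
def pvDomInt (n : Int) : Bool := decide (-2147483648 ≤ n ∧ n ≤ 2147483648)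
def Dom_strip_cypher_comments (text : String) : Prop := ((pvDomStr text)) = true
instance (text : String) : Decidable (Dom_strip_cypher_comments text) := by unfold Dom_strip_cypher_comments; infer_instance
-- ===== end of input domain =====

-- B replaces A's char-by-char five-flag state machine by a span scanner that consumes
-- whole comments/quoted literals at once (objective: faster, measured ~1.9x; same return value).

-- ===== PORT A =====
-- literal transliteration of A's while loop: position = remaining char list,
-- state flags (in_single, in_double, in_backtick, in_line_comment, in_block_comment)
def stripALoop (cs : List Char) (s d b lc bc : Bool) : List Char :=
  match cs with
  | [] => []
  | ch :: rest =>
    if lc = true then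
      if ch = '\n' then ch :: stripALoop rest s d b false bc
      else stripALoop rest s d b lc bc
    else if bc = true then
      if ch = '*' ∧ rest.head? = some '/' then stripALoop rest.tail s d b lc false
      else stripALoop rest s d b lc bc
    else if s = false ∧ d = false ∧ b = false ∧ ch = '/' ∧ rest.head? = some '/' then
      stripALoop rest.tail s d b true bc
    else if s = false ∧ d = false ∧ b = false ∧ ch = '/' ∧ rest.head? = some '*' then
      stripALoop rest.tail s d b lc true
    else if ch = '\'' ∧ d = false ∧ b = false then
      if s = true ∧ rest.head? = some '\'' then
        '\'' :: '\'' :: stripALoop rest.tail s d b lc bc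
      else ch :: stripALoop rest (!s) d b lc bc
    else if ch = '"' ∧ s = false ∧ b = false then ch :: stripALoop rest s (!d) b lc bc
    else if ch = '`' ∧ s = false ∧ d = false then ch :: stripALoop rest s d (!b) lc bc
    else ch :: stripALoop rest s d b lc bc
  termination_by cs.length
  decreasing_by all_goals (simp; try omega)

def strip_cypher_comments (text : String) : String :=
  String.ofList (stripALoop text.toList false false false false false)

-- ===== PORT B =====
-- skip to the terminating newline of a line comment (newline kept)
def skipLine : List Char → List Char
  | [] => []
  | c :: r => if c = '\n' then c :: r else skipLine r

-- skip past the closing */ of a block comment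
def skipBlock : List Char → List Char
  | [] => []
  | c :: r => if c = '*' ∧ r.head? = some '/' then r.tail else skipBlock r

-- consume a single-quoted literal body ('' is an escape), closing quote included
def takeSingle : List Char → List Char × List Char
  | [] => ([], [])
  | c :: r =>
    if c = '\'' then
      if r.head? = some '\'' then
        ('\'' :: '\'' :: (takeSingle r.tail).1, (takeSingle r.tail).2)
      else ([c], r)
    else (c :: (takeSingle r).1, (takeSingle r).2)
  termination_by cs => cs.length
  decreasing_by all_goals (simp; try omega)

-- consume up to and including the closing delimiter q (or everything)
def takeDelim (q : Char) : List Char → List Char × List Char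
  | [] => ([], [])
  | c :: r =>
    if c = q then ([c], r)
    else (c :: (takeDelim q r).1, (takeDelim q r).2)

theorem skipLine_length_le (cs : List Char) : (skipLine cs).length ≤ cs.length := by
  induction cs with
  | nil => simp [skipLine]
  | cons c r ih => simp only [skipLine]; split <;> simp <;> omega

theorem skipBlock_length_le (cs : List Char) : (skipBlock cs).length ≤ cs.length := by
  induction cs with
  | nil => simp [skipBlock]
  | cons c r ih => simp only [skipBlock]; split <;> simp <;> omega

theorem takeSingle_snd_length_le (cs : List Char) : (takeSingle cs).2.length ≤ cs.length := by
  fun_induction takeSingle cs with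
  | case1 => simp [takeSingle]
  | case2 r h2 ih =>
    have ht : r.tail.length = r.length - 1 := by simp
    simp [takeSingle, h2]; omega
  | case3 r h2 => simp [takeSingle, h2]
  | case4 c r h ih => simp [takeSingle, h]; omega

theorem takeDelim_snd_length_le (q : Char) (cs : List Char) :
    (takeDelim q cs).2.length ≤ cs.length := by
  induction cs with
  | nil => simp [takeDelim]
  | cons c r ih => simp only [takeDelim]; split <;> simp <;> omega

def stripBLoop : List Char → List Char
  | [] => []
  | c :: r =>
    if c = '/' ∧ r.head? = some '/' then stripBLoop (skipLine r.tail)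
    else if c = '/' ∧ r.head? = some '*' then stripBLoop (skipBlock r.tail)
    else if c = '\'' then c :: (takeSingle r).1 ++ stripBLoop (takeSingle r).2
    else if c = '"' then c :: (takeDelim '"' r).1 ++ stripBLoop (takeDelim '"' r).2
    else if c = '`' then c :: (takeDelim '`' r).1 ++ stripBLoop (takeDelim '`' r).2
    else c :: stripBLoop r
  termination_by cs => cs.length
  decreasing_by
    · have h1 := skipLine_length_le r.tail
      have h2 : r.tail.length = r.length - 1 := by simp
      simp; omega
    · have h1 := skipBlock_length_le r.tail
      have h2 : r.tail.length = r.length - 1 := by simp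
      simp; omega
    · have := takeSingle_snd_length_le r; simp; omega
    · have := takeDelim_snd_length_le '"' r; simp; omega
    · have := takeDelim_snd_length_le '`' r; simp; omega
    · simp

def strip_cypher_comments_alt (text : String) : String :=
  String.ofList (stripBLoop text.toList)

-- ===== PRECONDITION & SPEC =====
def Spec_strip_cypher_comments (text : String) (out : String) : Prop := out = strip_cypher_comments_alt text
instance (text : String) (out : String) : Decidable (Spec_strip_cypher_comments text out) := by unfold Spec_strip_cypher_comments; infer_instance

-- ===== CLAIM (what is proved, stated in full; the proofs are below) =====
def Claim_equal_strip_cypher_comments : Prop := ∀ (text : String), Dom_strip_cypher_comments text → Spec_strip_cypher_comments text (strip_cypher_comments text)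

-- ===== LEMMAS AND PROOFS =====

theorem loopA_line (cs : List Char) :
    stripALoop cs false false false true false
      = stripALoop (skipLine cs) false false false false false := by
  fun_induction skipLine cs with
  | case1 => simp [stripALoop]
  | case2 => rename_i r; simp [stripALoop]
  | case3 c r h ih => simp [stripALoop, h, ih]

theorem loopA_block (cs : List Char) :
    stripALoop cs false false false false true
      = stripALoop (skipBlock cs) false false false false false := by
  induction cs with
  | nil => simp [stripALoop, skipBlock]
  | cons c r ih =>
    by_cases h : c = '*' ∧ r.head? = some '/'
    · simp [stripALoop, skipBlock, h]
    · simp [stripALoop, skipBlock, h, ih]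

theorem loopA_single (cs : List Char) :
    stripALoop cs true false false false false
      = (takeSingle cs).1 ++ stripALoop (takeSingle cs).2 false false false false false := by
  fun_induction takeSingle cs with
  | case1 => simp [stripALoop, takeSingle]
  | case2 r h2 ih => simp [stripALoop, takeSingle, h2, ih]
  | case3 r h2 => simp [stripALoop, takeSingle, h2]
  | case4 c r h ih => simp [stripALoop, takeSingle, h, ih]

theorem loopA_double (cs : List Char) :
    stripALoop cs false true false false false
      = (takeDelim '"' cs).1 ++ stripALoop (takeDelim '"' cs).2 false false false false false := by
  induction cs with
  | nil => simp [stripALoop, takeDelim]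
  | cons c r ih =>
    by_cases h : c = '"'
    · subst h; simp [stripALoop, takeDelim]
    · simp [stripALoop, takeDelim, h, ih]

theorem loopA_backtick (cs : List Char) :
    stripALoop cs false false true false false
      = (takeDelim '`' cs).1 ++ stripALoop (takeDelim '`' cs).2 false false false false false := by
  induction cs with
  | nil => simp [stripALoop, takeDelim]
  | cons c r ih =>
    by_cases h : c = '`'
    · subst h; simp [stripALoop, takeDelim]
    · simp [stripALoop, takeDelim, h, ih]

theorem loopA_eq_loopB (cs : List Char) :
    stripALoop cs false false false false false = stripBLoop cs := by
  fun_induction stripBLoop cs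
  case case1 => simp [stripALoop]
  case case2 h ih => simp [stripALoop, h, loopA_line, ih]
  case case3 h1 h2 ih => simp [stripALoop, h1, h2, loopA_block, ih]
  case case4 r h1 h2 ih => simp [stripALoop, loopA_single, ih]
  case case5 r h1 h2 h3 ih => simp [stripALoop, loopA_double, ih]
  case case6 r h1 h2 h3 h4 ih => simp [stripALoop, loopA_backtick, ih]
  case case7 h1 h2 h3 h4 h5 ih => simp [stripALoop, h1, h2, h3, h4, h5, ih]

-- ===== VERDICT (by name: the statement is the Claim_ definition above) =====
theorem strip_cypher_comments_spec : Claim_equal_strip_cypher_comments := by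
  intro text _
  unfold Spec_strip_cypher_comments strip_cypher_comments strip_cypher_comments_alt
  exact congrArg String.ofList (loopA_eq_loopB text.toList)
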